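-- pv_equiv track=rewrite | github.com/donkeyideas/kamioi | backend/blueprints/auth/helpers.py | get_user_id_from_token
-- ===== SOURCE A (Python) =====
-- def get_user_id_from_token(token):
--     """
--     Get user ID from a token string (without request context).
--
--     Args:
--         token: Token string to parse
--
--     Returns:
--         int or None: The user ID, or None if invalid
--     """
--     if not token:
--         return None
--
--     prefixes = ['token_', 'family_token_', 'user_token_', 'business_token_']
--
--     for prefix in prefixes:
--         if token.startswith(prefix):
--             uid_str = token.split(prefix, 1)[1]
--             try:
--                 return int(uid_str)
--             except ValueError:
--                 return None
--
--     return None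
-- ===== SOURCE B (Python) =====
-- def get_user_id_from_token(token):
--     """
--     Get user ID from a token string (without request context).
--
--     Single-scan variant: instead of trying each prefix in turn, find the first
--     occurrence of 'token_' and check that everything before it is one of the
--     allowed prefix heads.
--     """
--     if not token:
--         return None
--     i = token.find('token_')
--     if i < 0 or token[:i] not in ('', 'family_', 'user_', 'business_'):
--         return None
--     try:
--         return int(token[i + 6:])
--     except ValueError:
--         return None
-- ===== Notes on version B (the rewrite author's own statement) =====
-- stated objective: alternative
-- what changed: Replaces the per-prefix startswith/split loop by a single find('token_') scan plus one membership test of the part before the match against the allowed prefix heads.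
import Mathlib
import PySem

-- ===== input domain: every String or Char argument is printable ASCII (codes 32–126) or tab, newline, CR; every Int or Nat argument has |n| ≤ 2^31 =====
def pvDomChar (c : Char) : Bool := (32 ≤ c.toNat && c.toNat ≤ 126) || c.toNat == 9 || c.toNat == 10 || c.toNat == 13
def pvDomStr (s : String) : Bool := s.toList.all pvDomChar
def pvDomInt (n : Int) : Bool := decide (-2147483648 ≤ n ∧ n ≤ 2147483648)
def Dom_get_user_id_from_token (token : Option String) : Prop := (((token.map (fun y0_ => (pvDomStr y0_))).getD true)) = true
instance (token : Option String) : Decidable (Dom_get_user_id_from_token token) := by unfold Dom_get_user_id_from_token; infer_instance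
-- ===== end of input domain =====

-- B replaces A's per-prefix startswith/split loop by one find('token_') scan plus a
-- membership test of the part before the match (objective: alternative single-pass form).


-- ===== PORT A =====
-- the for-loop over the prefix list, one step per prefix
def pvLoopA : List String → String → Option Int
  | [], _ => none
  | p :: ps, t =>
    if PySem.Str.startswith t p then
      -- uid_str = token.split(prefix, 1)[1]; the arms returning none are unreachable
      -- (the prefix is nonempty and present; Python would raise there)
      match PySem.Str.splitMax? t p 1 with
      | none => none
      | some parts =>
        match PySem.List.pyGet? parts 1 with
        | none => none
        | some uid_str => PySem.Int.ofStr? uid_str   -- try: int(uid_str) except ValueError: None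
    else pvLoopA ps t

def get_user_id_from_token (token : Option String) : Option Int :=
  match token with
  | none => none
  | some t =>
    if t = "" then none   -- 'if not token'
    else pvLoopA ["token_", "family_token_", "user_token_", "business_token_"] t

-- ===== PORT B =====
def get_user_id_from_token_alt (token : Option String) : Option Int :=
  match token with
  | none => none
  | some t =>
    if t = "" then none   -- 'if not token'
    else
      let i := PySem.Chars.find t.toList "token_".toList   -- token.find('token_')
      let head := PySem.Chars.slice t.toList none (some i) -- token[:i]
      -- tuple membership = successive equality tests
      if i < 0 ∨ ¬ (head = "".toList ∨ head = "family_".toList ∨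
                    head = "user_".toList ∨ head = "business_".toList) then none
      else
        -- try: int(token[i+6:]) except ValueError: None
        PySem.Int.ofStr? (String.ofList (PySem.Chars.slice t.toList (some (i + 6)) none))

-- ===== PRECONDITION & SPEC =====
def Spec_get_user_id_from_token (token : Option String) (out : Option Int) : Prop := out = get_user_id_from_token_alt token
instance (token : Option String) (out : Option Int) : Decidable (Spec_get_user_id_from_token token out) := by unfold Spec_get_user_id_from_token; infer_instance

-- ===== CLAIM (what is proved, stated in full; the proofs are below) =====
def Claim_equal_get_user_id_from_token : Prop := ∀ (token : Option String), Dom_get_user_id_from_token token → Spec_get_user_id_from_token token (get_user_id_from_token token)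

-- ===== LEMMAS AND PROOFS =====

lemma sw_iff (t p : String) : PySem.Str.startswith t p = true ↔ p.toList <+: t.toList := by
  rw [PySem.Str.startswith]; exact PySem.Chars.startswith_iff _ _

-- with maxsplit exhausted the split loop returns the rest as the final piece
lemma go_zero (sep : List Char) (fuel : Nat) (l : List Char) (acc : List (List Char)) :
    PySem.Chars.splitOnMax.go sep fuel 0 l [] acc = (l :: acc).reverse := by
  cases fuel <;> cases l <;> simp [PySem.Chars.splitOnMax.go]

-- s.split(p, 1) when p is a nonempty prefix of s: ['', rest]
lemma splitOnMax_one_of_prefix (p cs : List Char) (hp : p ≠ []) (h : p <+: cs) :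
    PySem.Chars.splitOnMax cs p 1 = [[], cs.drop p.length] := by
  obtain ⟨r, rfl⟩ := h
  cases p with
  | nil => exact absurd rfl hp
  | cons a q =>
    simp only [PySem.Chars.splitOnMax]
    rw [if_neg (by norm_num)]
    have hpre : (a :: q).isPrefixOf (a :: (q ++ r)) = true := by
      simpa [List.isPrefixOf_iff_prefix] using (List.prefix_append (a :: q) r)
    simp only [List.cons_append, PySem.Chars.splitOnMax.go, Int.toNat_one]
    rw [if_pos hpre, show (1 : Nat) - 1 = 0 from rfl, go_zero]
    simp

-- find s sub = k when sub occurs at k and at no earlier position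
lemma find_first (cs sub : List Char) (k : Nat) (_hk : k ≤ cs.length)
    (h : sub <+: cs.drop k) (hmin : ∀ j, j < k → ¬ sub <+: cs.drop j) :
    PySem.Chars.find cs sub = (k : Int) := by
  have hinf : sub <:+: cs := h.isInfix.trans (List.drop_suffix k cs).isInfix
  have hne : PySem.Chars.find cs sub ≠ -1 := (PySem.Chars.find_ne_neg_one_iff cs sub).2 hinf
  have hspec := PySem.Chars.findFrom_natCast_spec cs sub 0 (by omega)
    (by simpa [PySem.Chars.findFrom_zero] using hne)
  rw [show ((0 : Nat) : Int) = 0 by norm_num, PySem.Chars.findFrom_zero] at hspec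
  obtain ⟨h0, hat, hmn⟩ := hspec
  set f := PySem.Chars.find cs sub with hf
  rcases lt_trichotomy f.toNat k with hlt | heq | hgt
  · exact absurd hat (hmin _ hlt)
  · omega
  · exact absurd h (hmn k (by omega) hgt)

-- if sub occurs at nonnegative position i, then take i ++ sub is a prefix of cs
lemma take_find_prefix (cs sub : List Char) (i : Int) (h0 : 0 ≤ i)
    (hf : PySem.Chars.find cs sub = i) :
    (cs.take i.toNat ++ sub) <+: cs := by
  have hne : PySem.Chars.find cs sub ≠ -1 := by omega
  have hspec := PySem.Chars.findFrom_natCast_spec cs sub 0 (by omega)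
    (by simpa [PySem.Chars.findFrom_zero] using hne)
  rw [show ((0 : Nat) : Int) = 0 by norm_num, PySem.Chars.findFrom_zero, hf] at hspec
  obtain ⟨-, hat, -⟩ := hspec
  obtain ⟨r, hr⟩ := hat
  exact ⟨r, by rw [List.append_assoc, hr, List.take_append_drop]⟩

-- no occurrence of "token_" can start inside the head part of a matched prefix
lemma no_early_occurrence (pre r : List Char) (j : Nat) (hj : j < pre.length)
    (hne : pre[j]? ≠ some 't') : ¬ "token_".toList <+: (pre ++ r).drop j := by
  intro hpr
  obtain ⟨u, hu⟩ := hpr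
  have h1 : (pre ++ r)[j]? = some 't' := by
    rw [← List.head?_drop, ← hu]; rfl
  rw [List.getElem?_append_left hj] at h1
  exact hne h1

-- B's inner computation on t = head ++ "token_" ++ r with no 't' in head
lemma branch_eq (head r : List Char) (hhd : ∀ j, j < head.length → head[j]? ≠ some 't') :
    PySem.Chars.find (head ++ "token_".toList ++ r) "token_".toList = (head.length : Int) ∧
    PySem.Chars.slice (head ++ "token_".toList ++ r) none (some (head.length : Int)) = head ∧
    PySem.Chars.slice (head ++ "token_".toList ++ r) (some ((head.length : Int) + 6)) none = r := by
  have hcs : head ++ "token_".toList ++ r = head ++ ("token_".toList ++ r) := by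
    rw [List.append_assoc]
  refine ⟨?_, ?_, ?_⟩
  · apply find_first
    · simp
    · rw [hcs, List.drop_append_of_le_length le_rfl]
      simp
    · intro j hj
      rw [hcs]
      exact no_early_occurrence head _ j hj (hhd j hj)
  · rw [PySem.Chars.slice_eq_listSlice,
      PySem.List.slice_to _ (Int.natCast_nonneg _), Int.toNat_natCast, hcs,
      List.take_append_of_le_length le_rfl, List.take_length]
  · rw [show (head.length : Int) + 6 = ((head.length + 6 : Nat) : Int) by push_cast; ring,
      PySem.Chars.slice_eq_listSlice,
      PySem.List.slice_from _ (Int.natCast_nonneg _), Int.toNat_natCast]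
    have h6 : head.length + 6 = (head ++ "token_".toList).length := by simp
    rw [h6]
    exact List.drop_left

-- A's per-prefix step when the prefix does not match: move on
lemma loopA_skip (t p : String) (h : PySem.Str.startswith t p = false) (ps : List String) :
    pvLoopA (p :: ps) t = pvLoopA ps t := by
  have h' : PySem.Chars.startswith t.toList p.toList = false := h
  simp [pvLoopA, h']

-- A's per-prefix step when the prefix matches: split and convert the remainder
lemma loopA_step (t p : String) (hp : p ≠ "") (h : PySem.Str.startswith t p = true)
    (ps : List String) :
    pvLoopA (p :: ps) t = PySem.Int.ofStr? (String.ofList (t.toList.drop p.toList.length)) := by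
  have hp' : p.toList ≠ [] := by
    intro hc; exact hp (by simpa using congrArg String.ofList hc)
  have hpre : p.toList <+: t.toList := (sw_iff t p).1 h
  simp only [pvLoopA, h, if_true]
  rw [PySem.Str.splitMax?, PySem.Chars.splitMax?, if_neg (by simpa using hp'),
    splitOnMax_one_of_prefix _ _ hp' hpre]
  simp [PySem.List.pyGet?, PySem.List.pyIdx?]

-- both programs agree whenever some prefix head ++ "token_" is at the front of t
lemma pos_case (t : String) (head : List Char)
    (hhd : ∀ j, j < head.length → head[j]? ≠ some 't')
    (hOK : head = "".toList ∨ head = "family_".toList ∨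
           head = "user_".toList ∨ head = "business_".toList)
    (hpre : (head ++ "token_".toList) <+: t.toList) :
    (let i := PySem.Chars.find t.toList "token_".toList
     let hd := PySem.Chars.slice t.toList none (some i)
     if i < 0 ∨ ¬ (hd = "".toList ∨ hd = "family_".toList ∨
                   hd = "user_".toList ∨ hd = "business_".toList) then none
     else PySem.Int.ofStr? (String.ofList (PySem.Chars.slice t.toList (some (i + 6)) none)))
    = PySem.Int.ofStr? (String.ofList (t.toList.drop (head ++ "token_".toList).length)) := by
  obtain ⟨r, hr⟩ := hpre
  rw [List.append_assoc] at hr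
  have hb := branch_eq head r hhd
  rw [List.append_assoc] at hb
  rw [← hr]
  obtain ⟨hf, hhde, hrest⟩ := hb
  simp only [hf, hhde, hrest]
  rw [if_neg (by push_neg; exact ⟨Int.natCast_nonneg _, hOK⟩)]
  congr 1
  refine congrArg String.ofList ?_
  rw [← List.append_assoc]
  exact List.drop_left.symm

-- ===== VERDICT (by name: the statement is the Claim_ definition above) =====
theorem get_user_id_from_token_spec : Claim_equal_get_user_id_from_token := by
  intro token _
  unfold Spec_get_user_id_from_token
  cases token with
  | none => rfl
  | some t =>
    by_cases ht : t = ""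
    · simp [get_user_id_from_token, get_user_id_from_token_alt, ht]
    · simp only [get_user_id_from_token, get_user_id_from_token_alt, if_neg ht]
      by_cases h1 : PySem.Str.startswith t "token_"
      · rw [loopA_step t "token_" (by decide) h1]
        exact (pos_case t [] (by intro j hj; simp at hj) (by left; rfl)
          (by simpa using (sw_iff t "token_").1 h1)).symm
      · by_cases h2 : PySem.Str.startswith t "family_token_"
        · rw [loopA_skip t "token_" (by simpa using h1),
            loopA_step t "family_token_" (by decide) h2]
          exact (pos_case t "family_".toList (by decide) (by right; left; rfl)
            (by rw [show "family_".toList ++ "token_".toList = "family_token_".toList by decide]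
                exact (sw_iff t "family_token_").1 h2)).symm
        · by_cases h3 : PySem.Str.startswith t "user_token_"
          · rw [loopA_skip t "token_" (by simpa using h1),
              loopA_skip t "family_token_" (by simpa using h2),
              loopA_step t "user_token_" (by decide) h3]
            exact (pos_case t "user_".toList (by decide) (by right; right; left; rfl)
              (by rw [show "user_".toList ++ "token_".toList = "user_token_".toList by decide]
                  exact (sw_iff t "user_token_").1 h3)).symm
          · by_cases h4 : PySem.Str.startswith t "business_token_"
            · rw [loopA_skip t "token_" (by simpa using h1),
                loopA_skip t "family_token_" (by simpa using h2),
                loopA_skip t "user_token_" (by simpa using h3),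
                loopA_step t "business_token_" (by decide) h4]
              exact (pos_case t "business_".toList (by decide) (by right; right; right; rfl)
                (by rw [show "business_".toList ++ "token_".toList = "business_token_".toList by decide]
                    exact (sw_iff t "business_token_").1 h4)).symm
            · -- no prefix matches: both sides are none
              rw [loopA_skip t "token_" (by simpa using h1),
                loopA_skip t "family_token_" (by simpa using h2),
                loopA_skip t "user_token_" (by simpa using h3),
                loopA_skip t "business_token_" (by simpa using h4),
                show pvLoopA [] t = none from rfl]
              rw [if_pos ?_]
              by_cases hi : PySem.Chars.find t.toList "token_".toList < 0
              · exact Or.inl hi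
              · push_neg at hi
                refine Or.inr ?_
                rw [PySem.Chars.slice_eq_listSlice, PySem.List.slice_to _ hi]
                push_neg
                have hpre := take_find_prefix t.toList "token_".toList _ hi rfl
                refine ⟨fun he => h1 ?_, fun he => h2 ?_, fun he => h3 ?_, fun he => h4 ?_⟩
                · rw [he] at hpre
                  exact (sw_iff t "token_").2 (by simpa using hpre)
                · rw [he] at hpre
                  exact (sw_iff t "family_token_").2 (by
                    rw [show "family_token_".toList = "family_".toList ++ "token_".toList by decide]
                    exact hpre)
                · rw [he] at hpre
                  exact (sw_iff t "user_token_").2 (by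
                    rw [show "user_token_".toList = "user_".toList ++ "token_".toList by decide]
                    exact hpre)
                · rw [he] at hpre
                  exact (sw_iff t "business_token_").2 (by
                    rw [show "business_token_".toList = "business_".toList ++ "token_".toList by decide]
                    exact hpre)
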